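-- pv_equiv track=rewrite | github.com/vishwasp1005/DL-PROJECT-PDF-TO-MCQ | core/chunker.py | _get_overlap_text
-- ===== SOURCE A (Python) =====
-- from typing import Generator, List
--
-- def _count_words(text: str) -> int:
--     return len(text.split())
--
-- def _get_overlap_text(sentences: List[str], overlap_words: int) -> str:
--     """
--     Return the last N words worth of sentences to use as overlap prefix
--     for the next chunk.
--     """
--     overlap_sentences = []
--     word_count = 0
--
--     for sentence in reversed(sentences):
--         w = _count_words(sentence)
--         if word_count + w > overlap_words and overlap_sentences:
--             break
--         overlap_sentences.insert(0, sentence)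
--         word_count += w
--
--     return " ".join(overlap_sentences)
-- ===== SOURCE B (Python) =====
-- def _get_overlap_text(sentences, overlap_words):
--     counts = [len(s.split()) for s in sentences]
--     total = sum(counts)
--     start = 0
--     while total > overlap_words and start < len(sentences) - 1:
--         total -= counts[start]
--         start += 1
--     return " ".join(sentences[start:])
-- ===== Notes on version B (the rewrite author's own statement) =====
-- stated objective: faster
-- what changed: B precomputes per-sentence word counts and the grand total once, then shrinks the suffix from the front while the remaining total exceeds overlap_words (always keeping the last sentence), instead of A's reverse iteration that grows a prefix list by repeated insert(0, ...).
import Mathlib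
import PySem

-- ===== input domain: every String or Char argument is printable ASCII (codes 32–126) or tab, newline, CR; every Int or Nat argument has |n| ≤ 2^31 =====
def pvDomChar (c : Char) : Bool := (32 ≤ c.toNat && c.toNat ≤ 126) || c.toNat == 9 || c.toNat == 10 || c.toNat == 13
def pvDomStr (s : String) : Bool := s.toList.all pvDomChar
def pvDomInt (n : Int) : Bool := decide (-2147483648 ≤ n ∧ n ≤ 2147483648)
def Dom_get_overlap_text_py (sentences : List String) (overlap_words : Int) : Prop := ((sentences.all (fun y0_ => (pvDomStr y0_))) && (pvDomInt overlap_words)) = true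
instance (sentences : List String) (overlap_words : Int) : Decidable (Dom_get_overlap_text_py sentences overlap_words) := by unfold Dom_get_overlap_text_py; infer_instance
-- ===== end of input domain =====

-- B replaces A's reverse accumulation with insert(0,...) by a precomputed count list
-- and a front-shrinking start index (alternative decomposition, same result).


-- ===== PORT A =====
-- _count_words(text) = len(text.split())
def pvCountWords (s : String) : Int := ((PySem.Str.split₀ s).length : Int)

-- the 'for sentence in reversed(sentences)' loop with its break, state (overlap_sentences, word_count)
def pvLoopA (W : Int) : List String → List String → Int → List String
  | [], acc, _ => acc
  | s :: rest, acc, wc =>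
    let w := pvCountWords s
    if W < wc + w ∧ acc ≠ [] then acc
    else pvLoopA W rest (s :: acc) (wc + w)

def get_overlap_text_py (sentences : List String) (overlap_words : Int) : String :=
  PySem.Str.join " " (pvLoopA overlap_words sentences.reverse [] 0)

-- ===== PORT B =====
-- the 'while total > overlap_words and start < len(sentences)-1' loop; the traversed
-- counts list stays aligned with start (counts[start] is its head)
def pvShrinkB (W : Int) (n : Nat) : List Int → Int → Nat → Nat
  | c :: rest, total, start =>
    if W < total ∧ start < n - 1 then pvShrinkB W n rest (total - c) (start + 1)
    else start
  | [], _, start => start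

def get_overlap_text_py_alt (sentences : List String) (overlap_words : Int) : String :=
  let counts := sentences.map (fun s => ((PySem.Str.split₀ s).length : Int))
  let total := counts.sum
  let start := pvShrinkB overlap_words sentences.length counts total 0
  PySem.Str.join " " (PySem.List.slice sentences (some (start : Int)) none)

-- ===== PRECONDITION & SPEC =====
def Spec_get_overlap_text_py (sentences : List String) (overlap_words : Int) (out : String) : Prop := out = get_overlap_text_py_alt sentences overlap_words
instance (sentences : List String) (overlap_words : Int) (out : String) : Decidable (Spec_get_overlap_text_py sentences overlap_words out) := by unfold Spec_get_overlap_text_py; infer_instance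

-- ===== CLAIM (what is proved, stated in full; the proofs are below) =====
def Claim_equal_get_overlap_text_py : Prop := ∀ (sentences : List String) (overlap_words : Int), Dom_get_overlap_text_py sentences overlap_words → Spec_get_overlap_text_py sentences overlap_words (get_overlap_text_py sentences overlap_words)

-- ===== LEMMAS AND PROOFS =====

-- total word count of a list of sentences
def pvWsum : List String → Int
  | [] => 0
  | s :: t => pvCountWords s + pvWsum t

-- the common spec index: smallest k with word-sum of the suffix ≤ W, capped at length-1
def pvK (W : Int) : List String → Nat
  | [] => 0
  | x :: rest => if pvWsum (x :: rest) ≤ W ∨ rest = [] then 0 else 1 + pvK W rest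

theorem pvCountWords_nonneg (s : String) : 0 ≤ pvCountWords s := by
  simp [pvCountWords]

theorem pvWsum_drop_le (l : List String) (k : Nat) : pvWsum (l.drop k) ≤ pvWsum l := by
  induction l generalizing k with
  | nil => simp
  | cons s t ih =>
    cases k with
    | zero => simp
    | succ k =>
      have h1 := ih k
      have h2 := pvCountWords_nonneg s
      simp only [List.drop_succ_cons, pvWsum]
      omega

theorem pvWsum_drop_mono (l : List String) (k j : Nat) (h : k ≤ j) :
    pvWsum (l.drop j) ≤ pvWsum (l.drop k) := by
  have : l.drop j = (l.drop k).drop (j - k) := by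
    rw [List.drop_drop]; congr 1; omega
  rw [this]; exact pvWsum_drop_le _ _

-- if every drop k for k < p.length still exceeds W, K skips all of p and lands on acc
theorem pvK_drop_prefix (W : Int) (p acc : List String) (hacc : acc ≠ [])
    (hle : pvWsum acc ≤ W)
    (hH : ∀ k, k < p.length → W < pvWsum ((p ++ acc).drop k)) :
    (p ++ acc).drop (pvK W (p ++ acc)) = acc := by
  induction p with
  | nil =>
    cases acc with
    | nil => simp at hacc
    | cons a t => simp [pvK, hle]
  | cons z p' ih =>
    have h0 : W < pvWsum (z :: (p' ++ acc)) := by simpa using hH 0 (by simp)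
    have hne : p' ++ acc ≠ [] := by
      cases acc with
      | nil => exact absurd rfl hacc
      | cons a t => simp
    have hK : pvK W (z :: (p' ++ acc)) = 1 + pvK W (p' ++ acc) := by
      simp only [pvK]
      rw [if_neg]; push_neg; exact ⟨by omega, hne⟩
    show (z :: (p' ++ acc)).drop (pvK W (z :: (p' ++ acc))) = acc
    rw [hK, Nat.one_add, List.drop_succ_cons]
    exact ih (fun k hk => by
      simpa using hH (k + 1) (by simp only [List.length_cons] at hk ⊢; omega))

-- A's loop, started on a non-empty accumulator within budget, lands on drop (pvK)
theorem pvLoopA_spec (W : Int) (r acc : List String) (hacc : acc ≠ [])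
    (hle : pvWsum acc ≤ W) :
    pvLoopA W r acc (pvWsum acc) = (r.reverse ++ acc).drop (pvK W (r.reverse ++ acc)) := by
  induction r generalizing acc with
  | nil =>
    cases acc with
    | nil => simp at hacc
    | cons a t => simp [pvLoopA, pvK, hle]
  | cons y r' ih =>
    simp only [pvLoopA]
    by_cases hbr : W < pvWsum acc + pvCountWords y
    · rw [if_pos ⟨hbr, hacc⟩]
      have harr : (y :: r').reverse ++ acc = (r'.reverse ++ [y]) ++ acc := by simp
      rw [harr]
      have hH : ∀ k, k < (r'.reverse ++ [y]).length →
          W < pvWsum (((r'.reverse ++ [y]) ++ acc).drop k) := by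
        intro k hk
        have hk' : k ≤ r'.reverse.length := by
          simp only [List.length_append, List.length_reverse, List.length_cons,
            List.length_nil] at hk ⊢
          omega
        have hdropy : ((r'.reverse ++ [y]) ++ acc).drop r'.reverse.length = y :: acc := by
          rw [List.append_assoc, List.drop_left]; rfl
        have hmono := pvWsum_drop_mono ((r'.reverse ++ [y]) ++ acc) k r'.reverse.length hk'
        rw [hdropy] at hmono
        simp only [pvWsum] at hmono
        omega
      exact (pvK_drop_prefix W (r'.reverse ++ [y]) acc hacc hle hH).symm
    · rw [if_neg (by push_neg; intro h; exact absurd h hbr)]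
      have hsum : pvWsum acc + pvCountWords y = pvWsum (y :: acc) := by
        simp [pvWsum]; ring
      rw [hsum]
      have := ih (y :: acc) (by simp) (by omega)
      rw [this]
      simp

-- when even the last sentence alone exceeds W, A's loop breaks immediately
theorem pvLoopA_break (W : Int) (r : List String) (y : String) (wc : Int)
    (h : W < wc) : pvLoopA W r [y] wc = [y] := by
  cases r with
  | nil => simp [pvLoopA]
  | cons z r' =>
    have := pvCountWords_nonneg z
    simp only [pvLoopA]
    rw [if_pos ⟨by omega, by simp⟩]

-- when no suffix fits, pvK is the cap length-1
theorem pvK_cap (W : Int) (l : List String) (hl : l ≠ [])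
    (hH : ∀ k, k < l.length → W < pvWsum (l.drop k)) : pvK W l = l.length - 1 := by
  induction l with
  | nil => simp at hl
  | cons x rest ih =>
    cases rest with
    | nil => simp [pvK]
    | cons b t =>
      have h0 : W < pvWsum (x :: b :: t) := by simpa using hH 0 (by simp)
      have hrec := ih (by simp) (fun k hk => by
        have := hH (k + 1) (by simp only [List.length_cons] at hk ⊢; omega)
        simpa using this)
      have hstep : pvK W (x :: b :: t)
          = if pvWsum (x :: b :: t) ≤ W ∨ (b :: t) = ([] : List String) then 0
            else 1 + pvK W (b :: t) := rfl
      rw [hstep, if_neg (by push_neg; exact ⟨by omega, by simp⟩), hrec]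
      simp only [List.length_cons]
      omega

-- A equals join " " (drop (pvK) l)
theorem portA_eq (l : List String) (W : Int) :
    get_overlap_text_py l W = PySem.Str.join " " (l.drop (pvK W l)) := by
  unfold get_overlap_text_py
  congr 1
  rcases hrev : l.reverse with _ | ⟨y, r⟩
  · have : l = [] := by simpa using congrArg List.reverse hrev
    subst this; simp [pvLoopA, pvK]
  · have hl : l = r.reverse ++ [y] := by
      have := congrArg List.reverse hrev
      simpa using this
    simp only [pvLoopA]
    rw [if_neg (by simp)]
    by_cases hy : pvCountWords y ≤ W
    · have hws : pvWsum [y] = pvCountWords y := by simp [pvWsum]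
      have h0 : (0 : Int) + pvCountWords y = pvWsum [y] := by rw [hws]; ring
      rw [h0, pvLoopA_spec W r [y] (by simp) (by rw [hws]; exact hy)]
      rw [← hl]
    · push_neg at hy
      have hz : (0 : Int) + pvCountWords y = pvCountWords y := by ring
      rw [hz, pvLoopA_break W r y _ hy]
      have hlast : l.drop (l.length - 1) = [y] := by
        rw [hl]
        have h3 : (r.reverse ++ [y]).length - 1 = r.reverse.length := by simp
        rw [h3, List.drop_left]
      rw [pvK_cap W l (by rw [hl]; simp) ?_, hlast]
      intro k hk
      have hk' : k ≤ l.length - 1 := by omega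
      have := pvWsum_drop_mono l k (l.length - 1) hk'
      rw [hlast] at this
      simp only [pvWsum] at this
      omega

-- B's shrink loop computes start + pvK of the remaining suffix (alignment invariant)
theorem pvShrinkB_spec (W : Int) (n : Nat) (l' : List String) (start : Nat)
    (hn : start + l'.length = n) :
    pvShrinkB W n (l'.map (fun s => ((PySem.Str.split₀ s).length : Int))) (pvWsum l') start
      = start + pvK W l' := by
  induction l' generalizing start with
  | nil => simp [pvShrinkB, pvK]
  | cons x rest ih =>
    simp only [List.map_cons, pvShrinkB]
    have hcond : (start < n - 1) ↔ rest ≠ [] := by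
      cases rest with
      | nil =>
        simp only [List.length_cons, List.length_nil] at hn
        simp; omega
      | cons b t =>
        simp only [List.length_cons] at hn
        simp; omega
    by_cases hW : W < pvWsum (x :: rest)
    · by_cases hr : rest = []
      · subst hr
        rw [if_neg (by rw [hcond]; simp)]
        simp [pvK]
      · rw [if_pos ⟨hW, by rw [hcond]; exact hr⟩]
        have hsub : pvWsum (x :: rest) - ((PySem.Str.split₀ x).length : Int) = pvWsum rest := by
          simp only [pvWsum, pvCountWords]; ring
        rw [hsub, ih (start + 1) (by simp only [List.length_cons] at hn ⊢; omega)]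
        have hstep : pvK W (x :: rest)
            = if pvWsum (x :: rest) ≤ W ∨ rest = ([] : List String) then 0
              else 1 + pvK W rest := rfl
        rw [hstep, if_neg (by push_neg; exact ⟨by omega, hr⟩)]
        omega
    · rw [if_neg (by push_neg; intro h; exact absurd h hW)]
      have hstep : pvK W (x :: rest)
          = if pvWsum (x :: rest) ≤ W ∨ rest = ([] : List String) then 0
            else 1 + pvK W rest := rfl
      rw [hstep, if_pos (Or.inl (by omega))]
      omega

-- sum of the mapped counts is pvWsum
theorem sum_counts_eq (l : List String) :
    (l.map (fun s => ((PySem.Str.split₀ s).length : Int))).sum = pvWsum l := by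
  induction l with
  | nil => simp [pvWsum]
  | cons s t ih => simp [pvWsum, ih, pvCountWords]

-- B equals join " " (drop (pvK) l)
theorem portB_eq (l : List String) (W : Int) :
    get_overlap_text_py_alt l W = PySem.Str.join " " (l.drop (pvK W l)) := by
  unfold get_overlap_text_py_alt
  simp only
  rw [sum_counts_eq, pvShrinkB_spec W l.length l 0 (by simp)]
  rw [PySem.List.slice_from_natCast]
  simp

-- ===== VERDICT (by name: the statement is the Claim_ definition above) =====
theorem get_overlap_text_py_spec : Claim_equal_get_overlap_text_py := by
  intro sentences overlap_words _
  unfold Spec_get_overlap_text_py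
  rw [portA_eq, portB_eq]
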